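-- pv_equiv track=rewrite | github.com/beratt06/MAS_Debate | retrieval/chunker.py | _split_segments
-- ===== SOURCE A (Python) =====
-- def _split_segments(text: str) -> list[str]:
--     """Metni paragraf farkindaligi olan cumle benzeri bolumlere ayirir."""
--
--     segments: list[str] = []
--
--     for paragraph in text.split("\n"):
--         paragraph = paragraph.strip()
--         if not paragraph:
--             continue
--
--         buffer = ""
--         for char in paragraph:
--             buffer += char
--             if char in ".!?;:" and len(buffer.strip()) >= 40:
--                 segments.append(buffer.strip())
--                 buffer = ""
--
--         if buffer.strip():
--             segments.append(buffer.strip())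
--
--     return segments
-- ===== SOURCE B (Python) =====
-- def _split_segments(text: str) -> list[str]:
--     """Cut-point recursion: repeatedly locate the first admissible break in the
--     remaining paragraph text, slice the segment off, and continue on the suffix."""
--     segments: list[str] = []
--     for paragraph in text.split("\n"):
--         rest = paragraph.strip()
--         while rest:
--             cut = None
--             for i, ch in enumerate(rest):
--                 if ch in ".!?;:" and len(rest[:i + 1].strip()) >= 40:
--                     cut = i
--                     break
--             if cut is None:
--                 tail = rest.strip()
--                 if tail:
--                     segments.append(tail)
--                 break
--             segments.append(rest[:cut + 1].strip())
--             rest = rest[cut + 1:]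
--     return segments
-- ===== Notes on version B (the rewrite author's own statement) =====
-- stated objective: alternative
-- what changed: Replaces A's single stateful char-by-char scan with buffer accumulation by a cut-point recursion: for each paragraph repeatedly find the first punctuation index whose stripped prefix reaches length 40, slice the segment off with one slice, and recurse on the remaining suffix.
import Mathlib
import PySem

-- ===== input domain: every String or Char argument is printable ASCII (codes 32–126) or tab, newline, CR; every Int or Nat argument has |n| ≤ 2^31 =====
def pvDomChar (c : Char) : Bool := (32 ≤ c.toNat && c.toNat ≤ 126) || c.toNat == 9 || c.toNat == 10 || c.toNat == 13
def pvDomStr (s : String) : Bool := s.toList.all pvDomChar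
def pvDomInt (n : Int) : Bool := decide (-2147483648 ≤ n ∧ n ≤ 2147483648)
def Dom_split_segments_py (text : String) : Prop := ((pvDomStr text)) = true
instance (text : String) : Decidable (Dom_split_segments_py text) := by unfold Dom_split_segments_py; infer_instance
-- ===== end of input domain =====

-- B replaces A's single stateful buffer scan by a cut-point recursion (find the first
-- admissible break, slice, recurse on the suffix); same cost, different decomposition.

-- ===== PORT A =====
-- char in ".!?;:"
def pvPunct (c : Char) : Bool := c == '.' || c == '!' || c == '?' || c == ';' || c == ':'

-- inner char loop step of A: state = (segments, buffer)
def pvStepA (st : List (List Char) × List Char) (c : Char) : List (List Char) × List Char :=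
  let buf := st.2 ++ [c]
  if pvPunct c && decide ((PySem.Chars.strip buf).length ≥ 40) then
    (st.1 ++ [PySem.Chars.strip buf], [])
  else (st.1, buf)

-- body of A's outer paragraph loop
def pvParaA (segs : List (List Char)) (para : List Char) : List (List Char) :=
  let p := PySem.Chars.strip para
  if p = [] then segs
  else
    let st := p.foldl pvStepA (segs, [])
    if PySem.Chars.strip st.2 ≠ [] then st.1 ++ [PySem.Chars.strip st.2] else st.1

def split_segments_py (text : String) : List String :=
  ((PySem.Chars.splitOn text.toList ['\n']).foldl pvParaA []).map (fun cs => String.ofList cs)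

-- ===== PORT B =====
-- B's inner cut search: `pre` is rest[:i], returns (rest[:cut+1], rest[cut+1:]) for the
-- first i with rest[i] in ".!?;:" and len(rest[:i+1].strip()) >= 40, else none.
def pvCutAux (pre : List Char) : List Char → Option (List Char × List Char)
  | [] => none
  | c :: cs =>
    if pvPunct c && decide ((PySem.Chars.strip (pre ++ [c])).length ≥ 40) then
      some (pre ++ [c], cs)
    else pvCutAux (pre ++ [c]) cs

theorem pvCutAux_shrink (rest : List Char) : ∀ (pre seg rest' : List Char),
    pvCutAux pre rest = some (seg, rest') → rest'.length < rest.length := by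
  induction rest with
  | nil => intro pre seg rest' h; simp [pvCutAux] at h
  | cons c cs ih =>
    intro pre seg rest' h
    by_cases hc : (pvPunct c && decide ((PySem.Chars.strip (pre ++ [c])).length ≥ 40)) = true
    · simp [pvCutAux, hc] at h
      simp [← h.2]
    · simp only [pvCutAux, hc, if_neg, Bool.not_eq_true] at h
      have := ih (pre ++ [c]) seg rest' (by simpa [hc] using h)
      simpa using Nat.lt_succ_of_lt this

-- B's while loop over the remaining paragraph text
def pvSplitPara (rest : List Char) : List (List Char) :=
  if h : rest = [] then []
  else
    match hcut : pvCutAux [] rest with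
    | none =>
      if PySem.Chars.strip rest ≠ [] then [PySem.Chars.strip rest] else []
    | some (seg, rest') => PySem.Chars.strip seg :: pvSplitPara rest'
termination_by rest.length
decreasing_by exact pvCutAux_shrink rest [] seg rest' hcut

def split_segments_py_alt (text : String) : List String :=
  ((PySem.Chars.splitOn text.toList ['\n']).flatMap
    (fun para => pvSplitPara (PySem.Chars.strip para))).map (fun cs => String.ofList cs)

-- ===== PRECONDITION & SPEC =====
def Spec_split_segments_py (text : String) (out : List String) : Prop := out = split_segments_py_alt text
instance (text : String) (out : List String) : Decidable (Spec_split_segments_py text out) := by unfold Spec_split_segments_py; infer_instance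

-- ===== CLAIM (what is proved, stated in full; the proofs are below) =====
def Claim_equal_split_segments_py : Prop := ∀ (text : String), Dom_split_segments_py text → Spec_split_segments_py text (split_segments_py text)

-- ===== LEMMAS AND PROOFS =====

theorem pvStrip_nil : PySem.Chars.strip ([] : List Char) = [] := by decide

-- unfolding equations for pvSplitPara (its equation is a dependent match on pvCutAux)
theorem pvSplitPara_none (rest : List Char) (h : pvCutAux [] rest = none) :
    pvSplitPara rest = if PySem.Chars.strip rest ≠ [] then [PySem.Chars.strip rest] else [] := by
  rw [pvSplitPara]
  by_cases hr : rest = []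
  · subst hr; simp [pvStrip_nil]
  · simp only [hr, dif_neg, not_false_iff]
    split <;> simp_all

theorem pvSplitPara_some (rest seg rest' : List Char) (h : pvCutAux [] rest = some (seg, rest')) :
    pvSplitPara rest = PySem.Chars.strip seg :: pvSplitPara rest' := by
  have hr : rest ≠ [] := by rintro rfl; simp [pvCutAux] at h
  rw [pvSplitPara]
  simp only [hr, dif_neg, not_false_iff]
  split <;> simp_all

-- A's fold over `rest` starting with buffer `b` either never cuts (and ends with
-- buffer b ++ rest) or performs the first cut exactly where pvCutAux b finds it.
theorem pvFold_cut (rest : List Char) : ∀ (segs : List (List Char)) (b : List Char),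
    (pvCutAux b rest = none → rest.foldl pvStepA (segs, b) = (segs, b ++ rest)) ∧
    (∀ seg rest', pvCutAux b rest = some (seg, rest') →
      rest.foldl pvStepA (segs, b)
        = rest'.foldl pvStepA (segs ++ [PySem.Chars.strip seg], [])) := by
  induction rest with
  | nil =>
    intro segs b
    refine ⟨fun _ => by simp, fun seg rest' h => by simp [pvCutAux] at h⟩
  | cons c cs ih =>
    intro segs b
    by_cases hc : (pvPunct c && decide ((PySem.Chars.strip (b ++ [c])).length ≥ 40)) = true
    · constructor
      · intro h; simp [pvCutAux, hc] at h
      · intro seg rest' h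
        simp only [pvCutAux, hc, if_pos, Option.some.injEq, Prod.mk.injEq] at h
        simp [List.foldl_cons, pvStepA, hc, ← h.1, ← h.2]
    · constructor
      · intro h
        have h' : pvCutAux (b ++ [c]) cs = none := by simpa [pvCutAux, hc] using h
        have := (ih segs (b ++ [c])).1 h'
        simp [List.foldl_cons, pvStepA, hc, this]
      · intro seg rest' h
        have h' : pvCutAux (b ++ [c]) cs = some (seg, rest') := by
          simpa [pvCutAux, hc] using h
        have := (ih segs (b ++ [c])).2 seg rest' h'
        simp [List.foldl_cons, pvStepA, hc, this]

-- A's per-paragraph processing of `rest` (fold then final flush) produces exactly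
-- segs ++ pvSplitPara rest.
theorem pvFold_splitPara (n : ℕ) : ∀ (rest : List Char), rest.length ≤ n → ∀ segs,
    (let st := rest.foldl pvStepA (segs, []);
     if PySem.Chars.strip st.2 ≠ [] then st.1 ++ [PySem.Chars.strip st.2] else st.1)
      = segs ++ pvSplitPara rest := by
  induction n with
  | zero =>
    intro rest hlen segs
    have : rest = [] := List.eq_nil_of_length_eq_zero (Nat.le_zero.mp hlen)
    subst this
    simp [pvSplitPara, pvStrip_nil]
  | succ n ih =>
    intro rest hlen segs
    cases hcut : pvCutAux [] rest with
    | none =>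
      have := (pvFold_cut rest segs []).1 hcut
      simp only [this, pvSplitPara_none rest hcut]
      by_cases hs : PySem.Chars.strip rest = [] <;> simp [hs]
    | some p =>
      obtain ⟨seg, rest'⟩ := p
      have hfold := (pvFold_cut rest segs []).2 seg rest' hcut
      have hlt := pvCutAux_shrink rest [] seg rest' hcut
      have hih := ih rest' (by omega) (segs ++ [PySem.Chars.strip seg])
      simp only [hfold, hih, pvSplitPara_some rest seg rest' hcut]
      simp

theorem pvParaA_eq (segs : List (List Char)) (para : List Char) :
    pvParaA segs para = segs ++ pvSplitPara (PySem.Chars.strip para) := by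
  unfold pvParaA
  by_cases hp : PySem.Chars.strip para = []
  · simp [hp, pvSplitPara]
  · simpa [hp] using
      pvFold_splitPara (PySem.Chars.strip para).length (PySem.Chars.strip para) le_rfl segs

theorem pvFoldlParaA (ps : List (List Char)) : ∀ segs,
    ps.foldl pvParaA segs
      = segs ++ ps.flatMap (fun para => pvSplitPara (PySem.Chars.strip para)) := by
  induction ps with
  | nil => intro segs; simp
  | cons p ps ih => intro segs; simp [List.foldl_cons, pvParaA_eq, ih]

-- ===== VERDICT (by name: the statement is the Claim_ definition above) =====
theorem split_segments_py_spec : Claim_equal_split_segments_py := by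
  intro text _
  unfold Spec_split_segments_py split_segments_py split_segments_py_alt
  rw [pvFoldlParaA]
  simp
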